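-- pv_equiv track=rewrite | github.com/pgexporter/pgexporter | contrib/prometheus_scrape/prometheus.py | find_best_example
-- ===== SOURCE A (Python) =====
-- from typing import Dict, List, Tuple, Optional
--
-- def find_best_example(metric_name: str, metrics_content: str) -> Optional[str]:
--     """Find the best example line for a metric."""
--     lines = metrics_content.split('\n')
--     best_example = None
--     best_priority = 0
--
--     for line in lines:
--         if line.startswith(metric_name):
--             priority = 0
--
--             # Prioritize lines with database="postgres"
--             if 'database="postgres"' in line:
--                 priority = 2
--             elif '{' in line:
--                 priority = 1
--             else:
--                 priority = 1
--
--             if priority > best_priority: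
--                 best_example = line
--                 best_priority = priority
--
--     return best_example
-- ===== SOURCE B (Python) =====
-- from typing import Optional
--
-- def find_best_example(metric_name: str, metrics_content: str) -> Optional[str]:
--     """Find the best example line for a metric (two-phase fallback search)."""
--     lines = metrics_content.split('\n')
--     pg = next((l for l in lines
--                if l.startswith(metric_name) and 'database="postgres"' in l), None)
--     if pg is not None:
--         return pg
--     return next((l for l in lines if l.startswith(metric_name)), None)
-- ===== Notes on version B (the rewrite author's own statement) =====
-- stated objective: simpler
-- what changed: Replaces the single priority-tracking accumulator loop with a two-phase fallback search: first scan for the earliest matching line containing database="postgres", then fall back to the earliest line that merely starts with the metric name.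
import Mathlib
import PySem

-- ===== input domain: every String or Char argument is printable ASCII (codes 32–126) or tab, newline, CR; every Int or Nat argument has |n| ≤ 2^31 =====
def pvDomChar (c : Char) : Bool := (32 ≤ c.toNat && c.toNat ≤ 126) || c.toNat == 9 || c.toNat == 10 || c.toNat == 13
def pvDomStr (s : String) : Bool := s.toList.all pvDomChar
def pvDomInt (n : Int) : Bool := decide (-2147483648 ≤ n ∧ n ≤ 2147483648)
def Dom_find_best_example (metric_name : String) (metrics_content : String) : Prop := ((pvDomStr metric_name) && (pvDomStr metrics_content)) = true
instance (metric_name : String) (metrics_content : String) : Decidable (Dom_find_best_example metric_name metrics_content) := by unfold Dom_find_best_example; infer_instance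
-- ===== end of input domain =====

-- B replaces A's single priority-tracking loop with a two-phase fallback search (postgres line first, then any matching line); objective: simpler.

-- ===== PORT A =====
-- A's priority-tracking loop: fold over the lines carrying (best_example, best_priority).
def find_best_example (metric_name : String) (metrics_content : String) : Option String :=
  -- sep "\n" ≠ "", so split? is always some; getD [] never fires
  let lines := (PySem.Str.split? metrics_content "\n").getD []
  let r := lines.foldl (fun (st : Option String × Int) line =>
    if PySem.Str.startswith line metric_name then
      let priority : Int :=
        if PySem.Str.isIn "database=\"postgres\"" line then 2
        else if PySem.Str.isIn "{" line then 1
        else 1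
      if st.2 < priority then (some line, priority) else st
    else st) (none, 0)
  r.1

-- ===== PORT B =====
-- B's two-phase fallback search: next(...) over a generator is List.find?.
def find_best_example_alt (metric_name : String) (metrics_content : String) : Option String :=
  let lines := (PySem.Str.split? metrics_content "\n").getD []
  match lines.find? (fun l => PySem.Str.startswith l metric_name
      && PySem.Str.isIn "database=\"postgres\"" l) with
  | some l => some l
  | none => lines.find? (fun l => PySem.Str.startswith l metric_name)

-- ===== PRECONDITION & SPEC =====
def Spec_find_best_example (metric_name : String) (metrics_content : String) (out : Option String) : Prop := out = find_best_example_alt metric_name metrics_content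
instance (metric_name : String) (metrics_content : String) (out : Option String) : Decidable (Spec_find_best_example metric_name metrics_content out) := by unfold Spec_find_best_example; infer_instance

-- ===== CLAIM (what is proved, stated in full; the proofs are below) =====
def Claim_equal_find_best_example : Prop := ∀ (metric_name : String) (metrics_content : String), Dom_find_best_example metric_name metrics_content → Spec_find_best_example metric_name metrics_content (find_best_example metric_name metrics_content)

-- ===== LEMMAS AND PROOFS =====

-- A's loop step, named for the proofs (same function as the lambda in the port).
def pvStep (mn : String) (st : Option String × Int) (line : String) : Option String × Int :=
  if PySem.Str.startswith line mn then
    let priority : Int :=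
      if PySem.Str.isIn "database=\"postgres\"" line then 2
      else if PySem.Str.isIn "{" line then 1
      else 1
    if st.2 < priority then (some line, priority) else st
  else st

-- once best_priority = 2, no later line can replace the best example
theorem pvFold_two (mn : String) (lines : List String) (l : String) :
    (lines.foldl (pvStep mn) (some l, 2)).1 = some l := by
  induction lines with
  | nil => rfl
  | cons x xs ih =>
      simp only [List.foldl_cons, pvStep]
      split_ifs <;> simp_all

-- from a priority-1 state, only a postgres line can take over, and the first one does
theorem pvFold_one (mn : String) (lines : List String) (l0 : String) :
    (lines.foldl (pvStep mn) (some l0, 1)).1 =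
      (match lines.find? (fun l => PySem.Str.startswith l mn
          && PySem.Str.isIn "database=\"postgres\"" l) with
       | some l => some l
       | none => some l0) := by
  induction lines generalizing l0 with
  | nil => rfl
  | cons x xs ih =>
      simp only [List.foldl_cons, List.find?_cons, pvStep]
      by_cases h1 : PySem.Str.startswith x mn
      · by_cases h2 : PySem.Str.isIn "database=\"postgres\"" x
        · simp_all [pvFold_two]
        · by_cases h3 : PySem.Str.isIn "{" x <;> simp_all
      · simp_all

-- from the initial state the loop computes exactly B's two-phase search
theorem pvFold_zero (mn : String) (lines : List String) :
    (lines.foldl (pvStep mn) (none, 0)).1 =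
      (match lines.find? (fun l => PySem.Str.startswith l mn
          && PySem.Str.isIn "database=\"postgres\"" l) with
       | some l => some l
       | none => lines.find? (fun l => PySem.Str.startswith l mn)) := by
  induction lines with
  | nil => rfl
  | cons x xs ih =>
      simp only [List.foldl_cons, List.find?_cons, pvStep]
      by_cases h1 : PySem.Str.startswith x mn
      · by_cases h2 : PySem.Str.isIn "database=\"postgres\"" x
        · simp_all [pvFold_two]
        · by_cases h3 : PySem.Str.isIn "{" x <;> simp_all [pvFold_one]
      · simp_all

-- ===== VERDICT (by name: the statement is the Claim_ definition above) =====
theorem find_best_example_spec : Claim_equal_find_best_example := by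
  intro mn mc _
  show find_best_example mn mc = find_best_example_alt mn mc
  unfold find_best_example find_best_example_alt
  exact pvFold_zero mn _
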